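-- pv_equiv track=rewrite | github.com/simonada/AI-Projects | SearchAlgorithms/clickomaniaplayer.py | compute_penalty
-- ===== SOURCE A (Python) =====
-- import math
-- import math
--
-- def compute_penalty(state):
--     total_reduction = 0
--     K = len(set(state))
--     for color in range(1, K + 1):
--         indices = [i for i, x in enumerate(state) if x == color]
--         if indices:
--             remaining_tiles = len(indices)
--             reduction = int(math.pow((remaining_tiles - 1), 2))
--             total_reduction += reduction
--     return total_reduction
-- ===== SOURCE B (Python) =====
-- import math
--
-- def compute_penalty(state):
--     counts = {}
--     for x in state:
--         counts[x] = counts.get(x, 0) + 1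
--     K = len(counts)
--     total = 0
--     for color, n in counts.items():
--         if 1 <= color <= K:
--             total += int(math.pow(n - 1, 2))
--     return total
-- ===== Notes on version B (the rewrite author's own statement) =====
-- stated objective: faster
-- what changed: Replaces the per-color scan of the whole state (one enumerate pass per color in range(1,K+1)) by a single frequency-dict pass; the total is then read off the dict's (color,count) items filtered by 1<=color<=K.
import Mathlib
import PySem

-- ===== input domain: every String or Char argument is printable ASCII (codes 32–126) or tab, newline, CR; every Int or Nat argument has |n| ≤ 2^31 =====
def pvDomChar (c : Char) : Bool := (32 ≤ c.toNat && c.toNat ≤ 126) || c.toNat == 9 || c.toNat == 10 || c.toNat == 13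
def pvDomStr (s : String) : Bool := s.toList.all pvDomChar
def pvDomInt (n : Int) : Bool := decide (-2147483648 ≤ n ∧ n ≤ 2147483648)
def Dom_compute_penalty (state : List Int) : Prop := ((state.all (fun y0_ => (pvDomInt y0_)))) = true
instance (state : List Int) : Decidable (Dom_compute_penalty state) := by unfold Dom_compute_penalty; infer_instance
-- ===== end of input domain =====

-- B replaces A's per-color rescans of state (one pass per color in range(1,K+1)) by a single
-- frequency-dict pass read off once; equal return value proved on the whole domain.
-- int(math.pow(r-1, 2)) is ported as (r-1)^2 on Int: exact since r = a tile count ≤ len(state),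
-- far below the 2^26 where the float square could round.

-- ===== PORT A =====
def compute_penalty (state : List Int) : Int :=
  -- total_reduction = 0; K = len(set(state))
  let K := (PySem.Set.ofList state).length
  -- for color in range(1, K + 1): …
  (PySem.List.pyRange 1 ((K : Int) + 1)).foldl
    (fun total_reduction color =>
      -- indices = [i for i, x in enumerate(state) if x == color]
      let indices := ((PySem.List.enumerate state).filter (fun p => p.2 == color)).map (·.1)
      if !indices.isEmpty then
        let remaining_tiles : Int := indices.length
        let reduction := (remaining_tiles - 1) ^ 2
        total_reduction + reduction
      else total_reduction) 0

-- ===== PORT B =====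
def compute_penalty_alt (state : List Int) : Int :=
  -- counts = {}; for x in state: counts[x] = counts.get(x, 0) + 1
  let counts := state.foldl (fun d x => d.insert x (d.getD x 0 + 1)) PySem.Dict.empty
  -- K = len(counts)
  let K : Int := counts.size
  -- for color, n in counts.items(): if 1 <= color <= K: total += (n-1)**2
  counts.items.foldl
    (fun total p => if 1 ≤ p.1 && p.1 ≤ K then total + (p.2 - 1) ^ 2 else total) 0

-- ===== PRECONDITION & SPEC =====
def Spec_compute_penalty (state : List Int) (out : Int) : Prop := out = compute_penalty_alt state
instance (state : List Int) (out : Int) : Decidable (Spec_compute_penalty state out) := by unfold Spec_compute_penalty; infer_instance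

-- ===== CLAIM (what is proved, stated in full; the proofs are below) =====
def Claim_equal_compute_penalty : Prop := ∀ (state : List Int), Dom_compute_penalty state → Spec_compute_penalty state (compute_penalty state)

-- ===== LEMMAS AND PROOFS =====

-- a fold that conditionally adds is the sum of a 0-padded map
theorem foldl_if_add {α : Type} (l : List α) (p : α → Bool) (f : α → Int) (a : Int) :
    l.foldl (fun t c => if p c then t + f c else t) a
      = a + (l.map (fun c => if p c then f c else 0)).sum := by
  induction l generalizing a with
  | nil => simp
  | cons x xs ih =>
    simp only [List.foldl_cons, List.map_cons, List.sum_cons, ih]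
    split_ifs <;> ring

-- a 0-padded sum is the sum over the filtered list
theorem sum_map_ite_filter {α : Type} (l : List α) (p : α → Bool) (f : α → Int) :
    (l.map (fun c => if p c then f c else 0)).sum = ((l.filter p).map f).sum := by
  induction l with
  | nil => simp
  | cons x xs ih =>
    by_cases h : p x <;> simp [h, ih]

-- the index list A builds for a color has length = the color's multiplicity
theorem enum_filter_length (l : List Int) (c s : Int) :
    (((PySem.List.enumerate l s).filter (fun p => p.2 == c)).map (·.1)).length
      = l.count c := by
  induction l generalizing s with
  | nil => simp [PySem.List.enumerate]
  | cons x xs ih =>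
    by_cases h : x = c <;>
      simp [PySem.List.enumerate, h, ih]

theorem nodup_pyRange_one (a b : Int) : (PySem.List.pyRange a b).Nodup := by
  rw [PySem.List.pyRange_of_pos a b Int.one_pos]
  exact (List.nodup_range).map (fun k l h => by omega)

-- A's result: the sum of (count-1)^2 over the colors of range(1, K+1) present in state
theorem compute_penalty_eq (state : List Int) :
    compute_penalty state
      = (((PySem.List.pyRange 1 ((((PySem.Set.ofList state).length : Int)) + 1)).filter
            (fun c => state.contains c)).map
          (fun c => ((state.count c : Int) - 1) ^ 2)).sum := by
  simp only [compute_penalty]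
  refine Eq.trans
    (PySem.List.foldl_congr_mem _ _
      (fun t c => if state.contains c then t + ((state.count c : Int) - 1) ^ 2 else t) 0 ?_) ?_
  · intro acc c _
    have hlen : (((PySem.List.enumerate state).filter (fun p => p.2 == c)).map (·.1)).length
        = state.count c := enum_filter_length state c 0
    by_cases h : c ∈ state
    · have h1 : state.contains c = true := by simpa using h
      have h2 : (((PySem.List.enumerate state).filter (fun p => p.2 == c)).map (·.1)).isEmpty = false := by
        rw [List.isEmpty_eq_false_iff, ← List.length_pos_iff_ne_nil, hlen]
        exact List.count_pos_iff.mpr h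
      simp only [h1, h2, Bool.not_false, if_true, hlen]
    · have h1 : state.contains c = false := by simpa using h
      have h2 : (((PySem.List.enumerate state).filter (fun p => p.2 == c)).map (·.1)).isEmpty = true := by
        rw [List.isEmpty_iff, ← List.length_eq_zero_iff, hlen, List.count_eq_zero]
        simpa using h
      simp only [h1, h2, Bool.not_true, Bool.false_eq_true, if_false]
  · rw [foldl_if_add, sum_map_ite_filter, zero_add]

-- B's result: the sum of (count-1)^2 over the distinct colors c with 1 <= c <= K
theorem compute_penalty_alt_eq (state : List Int) :
    compute_penalty_alt state
      = (((PySem.Set.ofList state).filter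
            (fun c => 1 ≤ c && c ≤ (((PySem.Set.ofList state).length : Int)))).map
          (fun c => ((state.count c : Int) - 1) ^ 2)).sum := by
  simp only [compute_penalty_alt]
  rw [PySem.Dict.foldl_insert_getD_add_one_eq_counter]
  simp only [PySem.Dict.size, PySem.Dict.items_counter, List.length_map, List.foldl_map]
  show (PySem.Set.ofList state).foldl
      (fun total c =>
        if 1 ≤ c && c ≤ (((PySem.Set.ofList state).length : Int)) then
          total + ((state.count c : Int) - 1) ^ 2
        else total) 0 = _
  rw [foldl_if_add, sum_map_ite_filter]
  simp

theorem compute_penalty_spec_aux (state : List Int) :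
    compute_penalty state = compute_penalty_alt state := by
  rw [compute_penalty_eq, compute_penalty_alt_eq]
  -- the two filtered color lists enumerate the same colors, without duplicates
  have hperm : ((PySem.List.pyRange 1 ((((PySem.Set.ofList state).length : Int)) + 1)).filter
        (fun c => state.contains c)).Perm
      ((PySem.Set.ofList state).filter
        (fun c => 1 ≤ c && c ≤ (((PySem.Set.ofList state).length : Int)))) := by
    rw [List.perm_ext_iff_of_nodup ((nodup_pyRange_one _ _).filter _)
      ((PySem.Set.nodup_ofList state).filter _)]
    intro c
    simp only [List.mem_filter, PySem.List.mem_pyRange_one, List.contains_iff_mem,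
      decide_eq_true_eq, Bool.and_eq_true, PySem.Set.mem_ofList]
    constructor
    · rintro ⟨⟨h1, h2⟩, h3⟩
      exact ⟨h3, by simpa using h1, by simpa using (by omega : c ≤ ((PySem.Set.ofList state).length : Int))⟩
    · rintro ⟨h1, h2, h3⟩
      exact ⟨⟨by simpa using h2, by omega⟩, h1⟩
  exact (hperm.map (fun c => ((state.count c : Int) - 1) ^ 2)).sum_eq

-- ===== VERDICT (by name: the statement is the Claim_ definition above) =====
theorem compute_penalty_spec : Claim_equal_compute_penalty := by
  intro state _
  unfold Spec_compute_penalty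
  exact compute_penalty_spec_aux state
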